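-- pv_equiv track=rewrite | github.com/TadejMohorcic/advent-of-code | 2016/2016-22.py | interchangable
-- ===== SOURCE A (Python) =====
-- def interchangable(key, node_dict):
--     valid = 0
--     used = node_dict[key][0]
--
--     for key_2 in node_dict:
--         if key != key_2:
--             if node_dict[key_2][1] >= used:
--                 valid += 1
--
--     return valid
-- ===== SOURCE B (Python) =====
-- def interchangable(key, node_dict):
--     used = node_dict[key][0]
--     avails = sorted(node_dict[k][1] for k in node_dict if k != key)
--     lo, hi = 0, len(avails)
--     while lo < hi:
--         mid = (lo + hi) // 2
--         if avails[mid] >= used: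
--             hi = mid
--         else:
--             lo = mid + 1
--     return len(avails) - lo
-- ===== Notes on version B (the rewrite author's own statement) =====
-- stated objective: alternative
-- what changed: B sorts the avail values of all other nodes and binary-searches (hand-written bisect_left loop) for the first avail >= used, returning len(avails) - position, instead of A's single counting pass with an in-loop key exclusion.
import Mathlib
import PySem

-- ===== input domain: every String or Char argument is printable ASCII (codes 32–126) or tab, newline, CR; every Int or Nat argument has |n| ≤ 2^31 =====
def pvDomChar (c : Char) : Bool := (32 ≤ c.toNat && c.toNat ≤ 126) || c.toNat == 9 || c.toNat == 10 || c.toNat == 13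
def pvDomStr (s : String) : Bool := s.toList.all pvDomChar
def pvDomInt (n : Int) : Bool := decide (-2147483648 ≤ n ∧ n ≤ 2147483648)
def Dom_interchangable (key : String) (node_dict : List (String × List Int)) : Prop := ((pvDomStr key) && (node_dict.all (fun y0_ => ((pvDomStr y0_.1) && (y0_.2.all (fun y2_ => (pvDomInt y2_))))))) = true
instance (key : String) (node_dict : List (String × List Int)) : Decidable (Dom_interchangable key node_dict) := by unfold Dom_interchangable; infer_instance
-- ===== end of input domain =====

-- B sorts the avail values of the other nodes and binary-searches for the first one >= used
-- (answer = len - position), instead of A's counting pass with in-loop key exclusion; same task, different algorithm.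


-- ===== PORT A =====
def interchangable (key : String) (node_dict : List (String × List Int)) : Int :=
  let d := PySem.Dict.mk node_dict
  let used : Int := PySem.List.pyGetD (d.getD key []) 0 0
  d.keys.foldl (fun valid key_2 =>
    if key ≠ key_2 then
      if PySem.List.pyGetD (d.getD key_2 []) 1 0 ≥ used then valid + 1 else valid
    else valid) 0

-- ===== PORT B =====
-- the while-loop of Source B; lo and hi always stay in [0, avails.length] and mid in [lo, hi),
-- so Nat indices and List.getD are exact for Python's avails[mid] here; the fuel argument only
-- makes the loop structurally total (hi - lo shrinks each step, so fuel = avails.length suffices)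
def pvBisect (avails : List Int) (used : Int) : Nat → Nat → Nat → Nat
  | 0, lo, _ => lo
  | fuel + 1, lo, hi =>
    if lo < hi then
      let mid := (lo + hi) / 2
      if avails.getD mid 0 ≥ used then pvBisect avails used fuel lo mid
      else pvBisect avails used fuel (mid + 1) hi
    else lo

def interchangable_alt (key : String) (node_dict : List (String × List Int)) : Int :=
  let d := PySem.Dict.mk node_dict
  let used : Int := PySem.List.pyGetD (d.getD key []) 0 0
  let avails : List Int :=
    PySem.List.sorted ((d.keys.filter (fun k => k ≠ key)).map
      (fun k => PySem.List.pyGetD (d.getD k []) 1 0)) (fun x => x) false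
  let lo := pvBisect avails used avails.length 0 avails.length
  (avails.length : Int) - lo

-- ===== PRECONDITION & SPEC =====
-- Pre_ excludes exactly the inputs on which the Python A raises: key absent (KeyError), the key's
-- record empty (IndexError on [0]), or some other node's record shorter than 2 (IndexError on [1]);
-- duplicate-key lists are excluded only because a Python dict cannot contain them.
def Pre_interchangable (key : String) (node_dict : List (String × List Int)) : Prop :=
  (node_dict.map Prod.fst).Nodup ∧
  (∃ kv ∈ node_dict, kv.1 = key ∧ 1 ≤ kv.2.length) ∧
  ∀ kv ∈ node_dict, kv.1 ≠ key → 2 ≤ kv.2.length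
instance (key : String) (node_dict : List (String × List Int)) : Decidable (Pre_interchangable key node_dict) := by unfold Pre_interchangable; infer_instance

def pvWitness_interchangable : String × (List (String × List Int)) :=
  ("a", [("a", [5, 2]), ("b", [1, 9]), ("c", [3, 4])])

def Spec_interchangable (key : String) (node_dict : List (String × List Int)) (out : Int) : Prop := out = interchangable_alt key node_dict
instance (key : String) (node_dict : List (String × List Int)) (out : Int) : Decidable (Spec_interchangable key node_dict out) := by unfold Spec_interchangable; infer_instance

-- ===== CLAIM (what is proved, stated in full; the proofs are below) =====
def Claim_equal_interchangable : Prop := ∀ (key : String) (node_dict : List (String × List Int)), Dom_interchangable key node_dict → Pre_interchangable key node_dict → Spec_interchangable key node_dict (interchangable key node_dict)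

-- ===== LEMMAS AND PROOFS =====

-- if all of l before index lo satisfies p and nothing from lo on does, countP p l = lo
theorem pv_countP_split (p : Int → Bool) (l : List Int) (lo : Nat)
    (hlo : lo ≤ l.length)
    (h1 : ∀ i, i < lo → p (l.getD i 0) = true)
    (h2 : ∀ i, lo ≤ i → i < l.length → p (l.getD i 0) = false) :
    l.countP p = lo := by
  have hsplit : l = l.take lo ++ l.drop lo := (List.take_append_drop lo l).symm
  rw [hsplit, List.countP_append]
  have htake : (l.take lo).countP p = (l.take lo).length := by
    rw [List.countP_eq_length]
    intro x hx
    obtain ⟨i, hi, hx⟩ := List.mem_iff_getElem.mp hx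
    simp only [List.length_take] at hi
    have hx' : x = l.getD i 0 := by
      rw [List.getD_eq_getElem l 0 (by omega), ← hx]
      simp
    rw [hx']
    exact h1 i (by omega)
  have hdrop : (l.drop lo).countP p = 0 := by
    rw [List.countP_eq_zero]
    intro x hx
    obtain ⟨i, hi, hx⟩ := List.mem_iff_getElem.mp hx
    simp only [List.length_drop] at hi
    have hx' : x = l.getD (lo + i) 0 := by
      rw [List.getD_eq_getElem l 0 (by omega), ← hx]
      simp
    rw [hx']
    intro hcontra
    rw [h2 (lo + i) (by omega) (by omega)] at hcontra
    exact Bool.false_ne_true hcontra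
  rw [htake, hdrop, List.length_take]
  omega

-- the binary search returns the number of elements < used, on a sorted list
theorem pv_bisect_count (avails : List Int) (used : Int)
    (hs : avails.Pairwise (· ≤ ·)) :
    ∀ fuel lo hi, hi - lo ≤ fuel → lo ≤ hi → hi ≤ avails.length →
      (∀ i, i < lo → avails.getD i 0 < used) →
      (∀ i, hi ≤ i → i < avails.length → used ≤ avails.getD i 0) →
      pvBisect avails used fuel lo hi = avails.countP (fun a => decide (a < used)) := by
  have hmono : ∀ i j, i ≤ j → j < avails.length →
      avails.getD i 0 ≤ avails.getD j 0 := by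
    intro i j hij hj
    rcases Nat.lt_or_ge i j with h | h
    · rw [List.getD_eq_getElem avails 0 (by omega), List.getD_eq_getElem avails 0 hj]
      exact List.pairwise_iff_getElem.mp hs i j (by omega) hj h
    · have : i = j := by omega
      subst this; rfl
  have hbase : ∀ lo, lo ≤ avails.length →
      (∀ i, i < lo → avails.getD i 0 < used) →
      (∀ i, lo ≤ i → i < avails.length → used ≤ avails.getD i 0) →
      lo = avails.countP (fun a => decide (a < used)) := by
    intro lo hl h1 h2
    exact (pv_countP_split _ avails lo hl
      (fun i hilo => by simpa using h1 i hilo)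
      (fun i hloi hil => by simpa using h2 i hloi hil)).symm
  intro fuel
  induction fuel with
  | zero =>
    intro lo hi hn hlh hhl h1 h2
    have hlohi : lo = hi := by omega
    subst hlohi
    exact hbase lo hhl h1 h2
  | succ fuel ih =>
    intro lo hi hn hlh hhl h1 h2
    rw [pvBisect]
    by_cases h : lo < hi
    · rw [if_pos h]
      simp only
      by_cases hc : avails.getD ((lo + hi) / 2) 0 ≥ used
      · rw [if_pos hc]
        refine ih lo ((lo + hi) / 2) (by omega) (by omega) (by omega) h1 ?_
        intro i hmi hil
        exact le_trans hc (hmono _ _ hmi hil)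
      · rw [if_neg hc]
        refine ih ((lo + hi) / 2 + 1) hi (by omega) (by omega) hhl ?_ h2
        intro i hi'
        have : avails.getD i 0 ≤ avails.getD ((lo + hi) / 2) 0 :=
          hmono _ _ (by omega) (by omega)
        omega
    · rw [if_neg h]
      have hlohi : lo = hi := by omega
      subst hlohi
      exact hbase lo hhl h1 h2

-- the elements below u and those at least u together exhaust a list
theorem pv_count_lt_add_ge (u : Int) (M : List Int) :
    M.countP (fun a => decide (a < u)) + M.countP (fun a => decide (a ≥ u)) = M.length := by
  induction M with
  | nil => rfl
  | cons x xs ih =>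
    simp only [List.countP_cons, List.length_cons]
    by_cases h : x < u
    · simp [h, not_le.mpr h] at ih ⊢
      omega
    · have h' : u ≤ x := by omega
      simp [h, h'] at ih ⊢
      omega

-- A's loop with in-loop exclusion counted as countP over the filtered key list
theorem pv_foldl_eq_countP (key : String) (p : String → Prop) [DecidablePred p] (l : List String) :
    l.foldl (fun valid key_2 =>
        if key ≠ key_2 then (if p key_2 then valid + 1 else valid) else valid) (0 : Int)
      = ((l.filter (fun k => k ≠ key)).countP (fun k => decide (p k)) : Int) := by
  have hfun : (fun (valid : Int) (key_2 : String) =>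
      if key ≠ key_2 then (if p key_2 then valid + 1 else valid) else valid)
      = (fun valid key_2 => if (key_2 ≠ key ∧ p key_2) then valid + 1 else valid) := by
    funext valid key_2
    by_cases h : key = key_2
    · subst h; simp
    · simp [h, Ne.symm h]
  rw [hfun, PySem.List.foldl_ite_add_one]
  have h : l.countP (fun k => decide (k ≠ key ∧ p k))
      = (l.filter (fun k => k ≠ key)).countP (fun k => decide (p k)) := by
    rw [List.countP_filter]
    apply List.countP_congr
    intro x _
    by_cases hp : p x <;> by_cases hk : x = key <;> simp [hp, hk]
  rw [h]
  ring

-- ===== VERDICT (by name: the statement is the Claim_ definition above) =====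
theorem interchangable_spec : Claim_equal_interchangable := by
  intro key node_dict _ _
  simp only [Spec_interchangable, interchangable, interchangable_alt]
  set d := PySem.Dict.mk node_dict with hd
  set used : Int := PySem.List.pyGetD (d.getD key []) 0 0 with hu
  set f : String → Int := fun k => PySem.List.pyGetD (d.getD k []) 1 0 with hf
  set L : List Int := (d.keys.filter (fun k => k ≠ key)).map f with hL
  set avails : List Int := PySem.List.sorted L (fun x => x) false with ha
  have hpw : avails.Pairwise (· ≤ ·) := PySem.List.sorted_pairwise L (fun x => x)
  have hbs : pvBisect avails used avails.length 0 avails.length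
      = avails.countP (fun a => decide (a < used)) :=
    pv_bisect_count avails used hpw
      avails.length 0 avails.length (by omega) (by omega) (by omega)
      (by intro i hi; omega) (by intro i hx hy; omega)
  rw [pv_foldl_eq_countP key (fun k => f k ≥ used) d.keys, hbs]
  have hperm : avails.Perm L := PySem.List.sorted_perm L (fun x => x) false
  have hlen : avails.length = L.length := hperm.length_eq
  have hcl : avails.countP (fun a => decide (a < used))
      = L.countP (fun a => decide (a < used)) := hperm.countP_eq _
  have hsum : L.countP (fun a => decide (a < used))
      + L.countP (fun a => decide (a ≥ used)) = L.length := pv_count_lt_add_ge used L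
  have hmapc : L.countP (fun a => decide (a ≥ used))
      = (d.keys.filter (fun k => k ≠ key)).countP (fun k => decide (f k ≥ used)) := by
    rw [hL, List.countP_map]
    rfl
  omega
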